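-- pv_equiv track=rewrite | github.com/aangit/ITBC | section_I/week_3/HW_5.py | color_by_type
-- ===== SOURCE A (Python) =====
-- def color_by_type(vehicle_list):
--     color_dict = {}
--     for vehicle in vehicle_list:
--         vehicle_type_key = vehicle["TIP_VOZILA"]
--         color_key = vehicle["BOJA"]
--         if vehicle_type_key not in color_dict:
--             color_dict[vehicle_type_key] = {}
--             vehicle_type_dict = color_dict[vehicle_type_key]
--             vehicle_type_dict[color_key] = 1
--
--         else:
--             vehicle_type_dict = color_dict[vehicle_type_key]
--             if color_key not in vehicle_type_dict:
--                 vehicle_type_dict[color_key] = 1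
--             else:
--                 vehicle_type_dict[color_key] += 1
--     return color_dict
-- ===== SOURCE B (Python) =====
-- def color_by_type(vehicle_list):
--     # One pass building a flat (type, color) -> count table, then a reshape
--     # pass turning it into the nested dict-of-dicts.
--     pair_counts = {}
--     for vehicle in vehicle_list:
--         pair = (vehicle["TIP_VOZILA"], vehicle["BOJA"])
--         pair_counts[pair] = pair_counts.get(pair, 0) + 1
--     result = {}
--     for (vehicle_type, color), count in pair_counts.items():
--         inner = result.get(vehicle_type, {})
--         inner[color] = count
--         result[vehicle_type] = inner
--     return result
-- ===== Notes on version B (the rewrite author's own statement) =====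
-- stated objective: alternative
-- what changed: B first builds a flat dict counting (type, color) pairs in one pass, then reshapes that flat table into the nested dict in a second pass, instead of maintaining the live nested dict while scanning; Pre_ excludes vehicles missing the TIP_VOZILA or BOJA key, on which A raises KeyError.
import Mathlib
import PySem

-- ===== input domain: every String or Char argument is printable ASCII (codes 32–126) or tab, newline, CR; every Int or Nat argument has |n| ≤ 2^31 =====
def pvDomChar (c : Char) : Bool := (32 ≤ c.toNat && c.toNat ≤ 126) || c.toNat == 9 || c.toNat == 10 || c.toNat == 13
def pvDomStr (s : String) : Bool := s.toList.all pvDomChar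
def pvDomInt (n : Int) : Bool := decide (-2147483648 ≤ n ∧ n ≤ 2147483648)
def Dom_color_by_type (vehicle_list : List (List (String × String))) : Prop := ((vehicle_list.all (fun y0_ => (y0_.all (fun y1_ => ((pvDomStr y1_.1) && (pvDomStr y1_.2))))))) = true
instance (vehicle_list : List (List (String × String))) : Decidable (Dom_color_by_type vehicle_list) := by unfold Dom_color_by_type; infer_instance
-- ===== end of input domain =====

-- B builds a flat (type, color) → count table in one pass and reshapes it into
-- the nested dict in a second pass, instead of maintaining the live nested
-- structure during the scan (alternative decomposition, same asymptotics).

-- vehicle["KEY"]: first-match lookup in the association list; the "" default is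
-- reached only outside Pre_ (where Python raises KeyError).
def pvGetKey (vehicle : List (String × String)) (k : String) : String :=
  ((PySem.Dict.mk vehicle).get? k).getD ""

-- ===== PORT A =====
-- loop body of A: one vehicle folded into the live nested dict
def pvStepA (color_dict : PySem.Dict String (PySem.Dict String Int))
    (vehicle : List (String × String)) : PySem.Dict String (PySem.Dict String Int) :=
  let vehicle_type_key := pvGetKey vehicle "TIP_VOZILA"
  let color_key := pvGetKey vehicle "BOJA"
  if color_dict.contains vehicle_type_key = false then
    -- color_dict[vehicle_type_key] = {}; vehicle_type_dict[color_key] = 1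
    color_dict.insert vehicle_type_key (PySem.Dict.empty.insert color_key 1)
  else
    let vehicle_type_dict := color_dict.getD vehicle_type_key PySem.Dict.empty
    if vehicle_type_dict.contains color_key = false then
      color_dict.insert vehicle_type_key (vehicle_type_dict.insert color_key 1)
    else
      color_dict.insert vehicle_type_key
        (vehicle_type_dict.insert color_key (vehicle_type_dict.getD color_key 0 + 1))

def color_by_type (vehicle_list : List (List (String × String))) : List (String × List (String × Int)) :=
  ((vehicle_list.foldl pvStepA PySem.Dict.empty).items).map (fun p => (p.1, p.2.items))

-- ===== PORT B =====
-- first pass: flat (type, color) → count table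
def pvStepFlat (pair_counts : PySem.Dict (String × String) Int)
    (vehicle : List (String × String)) : PySem.Dict (String × String) Int :=
  let pair := (pvGetKey vehicle "TIP_VOZILA", pvGetKey vehicle "BOJA")
  pair_counts.insert pair (pair_counts.getD pair 0 + 1)

-- second pass: reshape one ((type, color), count) entry into the nested result
def pvStepR (result : PySem.Dict String (PySem.Dict String Int))
    (entry : (String × String) × Int) : PySem.Dict String (PySem.Dict String Int) :=
  let inner := result.getD entry.1.1 PySem.Dict.empty
  result.insert entry.1.1 (inner.insert entry.1.2 entry.2)

def color_by_type_alt (vehicle_list : List (List (String × String))) : List (String × List (String × Int)) :=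
  let pair_counts := vehicle_list.foldl pvStepFlat PySem.Dict.empty
  let result := pair_counts.items.foldl pvStepR PySem.Dict.empty
  result.items.map (fun p => (p.1, p.2.items))

-- ===== PRECONDITION & SPEC =====
-- Pre_ excludes vehicles missing the "TIP_VOZILA" or "BOJA" key, on which the Python A raises KeyError.
def Pre_color_by_type (vehicle_list : List (List (String × String))) : Prop :=
  ∀ v ∈ vehicle_list,
    ((PySem.Dict.mk v).get? "TIP_VOZILA").isSome = true ∧ ((PySem.Dict.mk v).get? "BOJA").isSome = true
instance (vehicle_list : List (List (String × String))) : Decidable (Pre_color_by_type vehicle_list) := by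
  unfold Pre_color_by_type; infer_instance

def pvWitness_color_by_type : (List (List (String × String))) :=
  [[("TIP_VOZILA", "auto"), ("BOJA", "red")], [("TIP_VOZILA", "auto"), ("BOJA", "red")]]

def Spec_color_by_type (vehicle_list : List (List (String × String))) (out : List (String × List (String × Int))) : Prop := out = color_by_type_alt vehicle_list
instance (vehicle_list : List (List (String × String))) (out : List (String × List (String × Int))) : Decidable (Spec_color_by_type vehicle_list out) := by unfold Spec_color_by_type; infer_instance

-- ===== CLAIM (what is proved, stated in full; the proofs are below) =====
def Claim_equal_color_by_type : Prop := ∀ (vehicle_list : List (List (String × String))), Dom_color_by_type vehicle_list → Pre_color_by_type vehicle_list → Spec_color_by_type vehicle_list (color_by_type vehicle_list)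

-- ===== LEMMAS AND PROOFS =====

theorem pv_dedup_append_singleton {α : Type} [BEq α] [LawfulBEq α] [DecidableEq α] (xs : List α) (x : α) :
    PySem.List.dedup (xs ++ [x]) =
      if x ∈ xs then PySem.List.dedup xs else PySem.List.dedup xs ++ [x] := by
  rw [PySem.List.dedup_eq_ofList, PySem.List.dedup_eq_ofList, PySem.Set.ofList_eq_foldl,
    PySem.Set.ofList_eq_foldl, List.foldl_append, List.foldl_cons, List.foldl_nil]
  have hc : (List.foldl PySem.Set.add [] xs).contains x = decide (x ∈ xs) := by
    have := PySem.Set.mem_ofList (xs := xs) (y := x)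
    rw [PySem.Set.ofList_eq_foldl] at this
    by_cases h : x ∈ xs
    · simp [h, this]
    · simp [h, this]
  show (if (List.foldl PySem.Set.add [] xs).contains x then _ else _) = _
  rw [hc]
  by_cases h : x ∈ xs <;> simp [h]

theorem pv_mem_filter_fst {t : String} {S : List (String × String)} {q : String × String} :
    q ∈ S.filter (fun p => p.1 == t) ↔ q ∈ S ∧ q.1 = t := by
  simp [List.mem_filter]

theorem pv_filter_eq_nil {t : String} {S : List (String × String)} (h : t ∉ S.map (·.1)) :
    S.filter (fun p => p.1 == t) = [] := by
  rw [List.filter_eq_nil_iff]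
  intro q hq
  simp only [beq_iff_eq]
  intro he; exact h (List.mem_map.mpr ⟨q, hq, he⟩)

theorem pv_mem_snd_filter {t c : String} {S : List (String × String)} :
    c ∈ (S.filter (fun p => p.1 == t)).map (·.2) ↔ (t, c) ∈ S := by
  constructor
  · rintro h
    rcases List.mem_map.mp h with ⟨q, hq, hc⟩
    rcases pv_mem_filter_fst.mp hq with ⟨hqS, hqt⟩
    have : q = (t, c) := by cases q; simp_all
    exact this ▸ hqS
  · intro h
    exact List.mem_map.mpr ⟨(t, c), pv_mem_filter_fst.mpr ⟨h, rfl⟩, rfl⟩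

theorem pv_nodup_snd_filter {t : String} {S : List (String × String)} (h : S.Nodup) :
    ((S.filter (fun p => p.1 == t)).map (·.2)).Nodup := by
  apply List.Nodup.map_on
  · intro q hq q' hq' he
    rcases pv_mem_filter_fst.mp hq with ⟨_, h1⟩
    rcases pv_mem_filter_fst.mp hq' with ⟨_, h1'⟩
    cases q; cases q'; simp_all
  · exact h.filter _

def pvInner (S : List (String × String)) (g : String × String → Int) (t : String) :
    PySem.Dict String Int :=
  PySem.Dict.mk ((S.filter (fun p => p.1 == t)).map (fun p => (p.2, g p)))

def pvSpecD (S : List (String × String)) (g : String × String → Int) :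
    PySem.Dict String (PySem.Dict String Int) :=
  PySem.Dict.mk ((PySem.List.dedup (S.map (·.1))).map (fun t => (t, pvInner S g t)))

theorem pv_keys_specD (S : List (String × String)) (g : String × String → Int) :
    (pvSpecD S g).keys = PySem.List.dedup (S.map (·.1)) := by
  rw [pvSpecD, PySem.Dict.keys_mk, List.map_map]
  rw [show ((fun x : String × PySem.Dict String Int => x.1) ∘ fun t => (t, pvInner S g t)) = id from rfl,
    List.map_id]

theorem pv_nodup_keys_specD (S : List (String × String)) (g : String × String → Int) :
    (pvSpecD S g).keys.Nodup := by
  rw [pv_keys_specD]; exact PySem.List.nodup_dedup _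

theorem pv_contains_specD (S : List (String × String)) (g : String × String → Int) (t : String) :
    (pvSpecD S g).contains t = decide (t ∈ S.map (·.1)) := by
  rw [PySem.Dict.contains_eq_decide_mem_keys, pv_keys_specD]
  simp

theorem pv_getD_specD (S : List (String × String)) (g : String × String → Int) {t : String}
    (h : t ∈ S.map (·.1)) :
    (pvSpecD S g).getD t PySem.Dict.empty = pvInner S g t := by
  apply PySem.Dict.getD_of_mem_items _ _ (pv_nodup_keys_specD S g)
  show (t, pvInner S g t) ∈ (PySem.List.dedup (S.map (·.1))).map (fun t => (t, pvInner S g t))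
  exact List.mem_map.mpr ⟨t, (PySem.List.mem_dedup _ _).mpr h, rfl⟩

-- inner dict of a fresh pair appended

theorem pv_contains_inner (S : List (String × String)) (g : String × String → Int)
    (t c : String) :
    (pvInner S g t).contains c = decide ((t, c) ∈ S) := by
  rw [PySem.Dict.contains_eq_decide_mem_keys, pvInner, PySem.Dict.keys_mk, List.map_map]
  have : ((fun x => x.1) ∘ fun p => (p.2, g p)) = fun p : String × String => p.2 := rfl
  rw [this]
  by_cases h : (t, c) ∈ S
  · simp [h, pv_mem_snd_filter.mpr h]
  · simp only [h, decide_false, decide_eq_false_iff_not]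
    intro hc; exact h (pv_mem_snd_filter.mp hc)

theorem pv_inner_append_self (S : List (String × String)) (g : String × String → Int)
    (t c : String) :
    pvInner (S ++ [(t, c)]) g t =
      PySem.Dict.mk ((S.filter (fun p => p.1 == t)).map (fun p => (p.2, g p)) ++ [(c, g (t, c))]) := by
  rw [pvInner, List.filter_append]
  simp [List.filter]

-- one reshape step from the spec of S gives the spec of S ++ [p] (p fresh)

theorem pv_inner_append_ne (S : List (String × String)) (g : String × String → Int)
    (p : String × String) {t : String} (hne : t ≠ p.1) :
    pvInner (S ++ [p]) g t = pvInner S g t := by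
  rw [pvInner, pvInner, List.filter_append, List.filter_singleton]
  have : (p.1 == t) = false := by simp [Ne.symm hne]
  rw [this]
  simp

theorem pv_stepR_spec (S : List (String × String)) (g : String × String → Int)
    (p : String × String) (_hS : S.Nodup) (hp : p ∉ S) :
    pvStepR (pvSpecD S g) (p, g p) = pvSpecD (S ++ [p]) g := by
  obtain ⟨t, c⟩ := p
  show (pvSpecD S g).insert t (((pvSpecD S g).getD t PySem.Dict.empty).insert c (g (t, c))) = _
  apply PySem.Dict.ext
  have hmapfst : (S ++ [(t, c)]).map (·.1) = S.map (·.1) ++ [t] := by simp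
  by_cases ht : t ∈ S.map (·.1)
  · -- existing type: inner gets a fresh color appended, outer entry replaced in place
    rw [pv_getD_specD S g ht]
    have hcontains : (pvSpecD S g).contains t = true := by simp [pv_contains_specD, ht]
    rw [PySem.Dict.items_insert_of_contains _ _ hcontains]
    have hinner : (pvInner S g t).insert c (g (t, c)) = pvInner (S ++ [(t, c)]) g t := by
      have hcc : (pvInner S g t).contains c = false := by
        simp only [pv_contains_inner, decide_eq_false_iff_not]; exact hp
      apply PySem.Dict.ext
      rw [PySem.Dict.items_insert_of_not_contains _ _ hcc, pv_inner_append_self]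
      rfl
    show List.map _ ((PySem.List.dedup (S.map (·.1))).map (fun t' => (t', pvInner S g t'))) = _
    have hded : PySem.List.dedup ((S ++ [(t, c)]).map (·.1)) = PySem.List.dedup (S.map (·.1)) := by
      rw [hmapfst, pv_dedup_append_singleton]; simp [ht]
    show _ = (PySem.List.dedup ((S ++ [(t, c)]).map (·.1))).map (fun t' => (t', pvInner (S ++ [(t, c)]) g t'))
    rw [hded, List.map_map]
    apply List.map_congr_left
    intro t' ht'
    simp only [Function.comp_apply]
    by_cases he : t' = t
    · subst he; simp [hinner]
    · simp only [beq_iff_eq, if_neg he]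
      rw [pv_inner_append_ne S g (t, c) he]
  · -- new type: a fresh (t, {c: n}) entry is appended at the end
    have hcontains : (pvSpecD S g).contains t = false := by
      simp only [pv_contains_specD, decide_eq_false_iff_not]; exact ht
    rw [PySem.Dict.getD_of_not_contains _ _ hcontains,
      PySem.Dict.items_insert_of_not_contains _ _ hcontains]
    have hded : PySem.List.dedup ((S ++ [(t, c)]).map (·.1)) = PySem.List.dedup (S.map (·.1)) ++ [t] := by
      rw [hmapfst, pv_dedup_append_singleton]; simp [ht]
    show _ = (PySem.List.dedup ((S ++ [(t, c)]).map (·.1))).map (fun t' => (t', pvInner (S ++ [(t, c)]) g t'))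
    rw [hded, List.map_append]
    congr 1
    · show (PySem.List.dedup (S.map (·.1))).map (fun t' => (t', pvInner S g t')) = _
      apply List.map_congr_left
      intro t' ht'
      have he : t' ≠ t := by
        intro h; subst h; exact ht ((PySem.List.mem_dedup _ _).mp ht')
      rw [pv_inner_append_ne S g (t, c) he]
    · have hfil : pvInner (S ++ [(t, c)]) g t = PySem.Dict.empty.insert c (g (t, c)) := by
        rw [pv_inner_append_self, pv_filter_eq_nil ht]
        rfl
      simp [hfil]

theorem pv_reshape_spec (S : List (String × String)) (g : String × String → Int)
    (h : S.Nodup) :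
    (S.map (fun k => (k, g k))).foldl pvStepR PySem.Dict.empty = pvSpecD S g := by
  induction S using List.reverseRecOn with
  | nil => rfl
  | append_singleton S p ih =>
    obtain ⟨hS, -, hdisj⟩ := List.nodup_append.mp h
    have hp : p ∉ S := fun hm => (hdisj p hm p (by simp)) rfl
    rw [List.map_append, List.foldl_append, ih hS]
    simp only [List.map_cons, List.map_nil, List.foldl_cons, List.foldl_nil]
    exact pv_stepR_spec S g p hS hp

theorem pv_inner_congr (S : List (String × String)) (g g' : String × String → Int) (t : String)
    (h : ∀ q ∈ S, q.1 = t → g q = g' q) : pvInner S g t = pvInner S g' t := by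
  rw [pvInner, pvInner]
  apply congrArg
  apply List.map_congr_left
  intro q hq
  rcases pv_mem_filter_fst.mp hq with ⟨hqS, hqt⟩
  rw [h q hqS hqt]

theorem pv_specD_congr (S : List (String × String)) (g g' : String × String → Int)
    (h : ∀ q ∈ S, g q = g' q) : pvSpecD S g = pvSpecD S g' := by
  apply PySem.Dict.ext
  apply List.map_congr_left
  intro t ht
  rw [pv_inner_congr S g g' t (fun q hq _ => h q hq)]

theorem pv_specD_bump (S : List (String × String)) (g g' : String × String → Int)
    (t c : String) (_hS : S.Nodup) (hp : (t, c) ∈ S)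
    (hg : ∀ q, q ≠ (t, c) → g' q = g q) :
    (pvSpecD S g).insert t ((pvInner S g t).insert c (g' (t, c))) = pvSpecD S g' := by
  have ht : t ∈ S.map (·.1) := List.mem_map.mpr ⟨(t, c), hp, rfl⟩
  have hinner : (pvInner S g t).insert c (g' (t, c)) = pvInner S g' t := by
    have hcc : (pvInner S g t).contains c = true := by
      simp [pv_contains_inner, hp]
    apply PySem.Dict.ext
    rw [PySem.Dict.items_insert_of_contains _ _ hcc]
    show List.map _ ((S.filter (fun p => p.1 == t)).map (fun p => (p.2, g p))) = _
    rw [List.map_map, pvInner]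
    apply List.map_congr_left
    intro q hq
    rcases pv_mem_filter_fst.mp hq with ⟨hqS, hqt⟩
    simp only [Function.comp_apply, beq_iff_eq]
    by_cases he : q.2 = c
    · have : q = (t, c) := by cases q; simp_all
      subst this; simp
    · rw [if_neg he, hg q (by intro h; subst h; exact he rfl)]
  have hcontains : (pvSpecD S g).contains t = true := by simp [pv_contains_specD, ht]
  apply PySem.Dict.ext
  rw [PySem.Dict.items_insert_of_contains _ _ hcontains]
  show List.map _ ((PySem.List.dedup (S.map (·.1))).map (fun t' => (t', pvInner S g t'))) = _
  rw [List.map_map]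
  apply List.map_congr_left
  intro t' ht'
  simp only [Function.comp_apply, beq_iff_eq]
  by_cases he : t' = t
  · subst he; simp [hinner]
  · rw [if_neg he]
    rw [pv_inner_congr S g g' t' (fun q hq hqt => ?_)]
    refine (hg q fun hqp => he ?_).symm
    subst hqp; exact hqt.symm ▸ rfl

def pvPk (vehicle : List (String × String)) : String × String :=
  (pvGetKey vehicle "TIP_VOZILA", pvGetKey vehicle "BOJA")

theorem pv_get?_inner_some (S : List (String × String)) (g : String × String → Int)
    {t c : String} (hS : S.Nodup) (h : (t, c) ∈ S) :
    (pvInner S g t).get? c = some (g (t, c)) := by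
  apply PySem.Dict.get?_of_mem_items
  · show (c, g (t, c)) ∈ (S.filter (fun p => p.1 == t)).map (fun p => (p.2, g p))
    exact List.mem_map.mpr ⟨(t, c), pv_mem_filter_fst.mpr ⟨h, rfl⟩, rfl⟩
  · rw [pvInner, PySem.Dict.keys_mk, List.map_map]
    rw [show ((fun x : String × Int => x.1) ∘ fun p : String × String => (p.2, g p)) =
      (fun p : String × String => p.2) from rfl]
    exact pv_nodup_snd_filter hS

theorem pv_foldA_spec (l : List (List (String × String))) :
    l.foldl pvStepA PySem.Dict.empty =
      pvSpecD (PySem.List.dedup (l.map pvPk)) (fun q => (List.count q (l.map pvPk) : Int)) := by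
  induction l using List.reverseRecOn with
  | nil => rfl
  | append_singleton l v ih =>
    rw [List.foldl_append, List.foldl_cons, List.foldl_nil, ih]
    have hmap : (l ++ [v]).map pvPk = l.map pvPk ++ [pvPk v] := by simp
    rw [hmap]
    set P := l.map pvPk with hP
    set t := pvGetKey v "TIP_VOZILA" with hT
    set c := pvGetKey v "BOJA" with hC
    have hpk : pvPk v = (t, c) := rfl
    rw [hpk]
    set S := PySem.List.dedup P with hSdef
    set g : String × String → Int := fun q => (List.count q P : Int) with hg
    set g' : String × String → Int := fun q => (List.count q (P ++ [(t, c)]) : Int) with hg'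
    have hS : S.Nodup := PySem.List.nodup_dedup _
    have hgne : ∀ q, q ≠ (t, c) → g' q = g q := by
      intro q hq
      rw [hg', hg]
      simp [List.count_append, Ne.symm hq]
    by_cases hpP : (t, c) ∈ P
    · -- seen pair: in-place bump
      have hS' : PySem.List.dedup (P ++ [(t, c)]) = S := by
        rw [pv_dedup_append_singleton, if_pos hpP]
      have hpS : (t, c) ∈ S := (PySem.List.mem_dedup _ _).mpr hpP
      have ht : t ∈ S.map (·.1) := List.mem_map.mpr ⟨(t, c), hpS, rfl⟩
      have hgp : g' (t, c) = g (t, c) + 1 := by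
        rw [hg', hg]; simp [List.count_append]
      rw [hS']
      show pvStepA (pvSpecD S g) v = pvSpecD S g'
      have hcont : (pvSpecD S g).contains t = true := by simp [pv_contains_specD, ht]
      have hcinner : (pvInner S g t).contains c = true := by simp [pv_contains_inner, hpS]
      rw [pvStepA]
      simp only [← hT, ← hC, hcont, pv_getD_specD S g ht, hcinner, if_neg (by simp : ¬ (true = false))]
      rw [PySem.Dict.getD_eq_get?_getD, pv_get?_inner_some S g hS hpS]
      show (pvSpecD S g).insert t ((pvInner S g t).insert c (g (t, c) + 1)) = pvSpecD S g'
      rw [← hgp]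
      exact pv_specD_bump S g g' t c hS hpS hgne
    · -- new pair: appended at the end
      have hpS : (t, c) ∉ S := fun h => hpP ((PySem.List.mem_dedup _ _).mp h)
      have hS' : PySem.List.dedup (P ++ [(t, c)]) = S ++ [(t, c)] := by
        rw [pv_dedup_append_singleton, if_neg hpP]
      have hgp : g' (t, c) = 1 := by
        rw [hg']
        simp [List.count_append, List.count_eq_zero.mpr hpP]
      have hcongr : pvSpecD S g = pvSpecD S g' := by
        apply pv_specD_congr
        intro q hq
        exact (hgne q (fun h => hpS (h ▸ hq))).symm
      rw [hS', ← pv_stepR_spec S g' (t, c) hS hpS, ← hcongr, hgp]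
      show pvStepA (pvSpecD S g) v =
        (pvSpecD S g).insert t (((pvSpecD S g).getD t PySem.Dict.empty).insert c 1)
      rw [pvStepA]
      by_cases ht : t ∈ S.map (·.1)
      · have hcont : (pvSpecD S g).contains t = true := by simp [pv_contains_specD, ht]
        have hcinner : (pvInner S g t).contains c = false := by
          simp only [pv_contains_inner, decide_eq_false_iff_not]; exact hpS
        simp only [← hT, ← hC, hcont, pv_getD_specD S g ht, hcinner,
          if_neg (by simp : ¬ (true = false))]
        simp
      · have hcont : (pvSpecD S g).contains t = false := by
          simp only [pv_contains_specD, decide_eq_false_iff_not]; exact ht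
        simp only [← hT, ← hC, hcont,
          PySem.Dict.getD_of_not_contains _ _ hcont]
        simp

-- B's first pass is Counter over the pair list
theorem pv_flat_eq_counter (l : List (List (String × String))) :
    l.foldl pvStepFlat PySem.Dict.empty = PySem.Dict.counter (l.map pvPk) := by
  rw [← PySem.Dict.foldl_insert_getD_add_one_eq_counter, List.foldl_map]
  rfl

-- ===== VERDICT (by name: the statement is the Claim_ definition above) =====
theorem color_by_type_spec : Claim_equal_color_by_type := by
  intro vehicle_list _ _
  unfold Spec_color_by_type
  simp only [color_by_type, color_by_type_alt]
  rw [pv_flat_eq_counter, PySem.Dict.items_counter, ← PySem.List.dedup_eq_ofList,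
    pv_reshape_spec (PySem.List.dedup (vehicle_list.map pvPk))
      (fun q => (List.count q (vehicle_list.map pvPk) : Int)) (PySem.List.nodup_dedup _),
    pv_foldA_spec]
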